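-- pv_equiv track=rewrite | github.com/lorenzoAllegrini/esa_challenge | tests/test_workflow.py | get_event_intervals
-- ===== SOURCE A (Python) =====
-- def get_event_intervals(segments, label):
--     labels = [int(s[0]) for s in segments]
--     intervals = []
--     start = None
--     for idx, val in enumerate(labels):
--         if val == label:
--             if start is None:
--                 start = idx
--         else:
--             if start is not None:
--                 intervals.append([start, idx - 1])
--                 start = None
--     if start is not None:
--         intervals.append([start, len(labels) - 1])
--     return intervals
-- ===== SOURCE B (Python) =====
-- def get_event_intervals(segments, label):
--     labels = [int(s[0]) for s in segments]
--     # phase 1: run-length encode the label sequence (pending run = (cur, cnt))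
--     runs = []
--     cur = None
--     cnt = 0
--     for v in labels:
--         if cur is not None and v == cur:
--             cnt += 1
--         else:
--             if cur is not None:
--                 runs.append((cur, cnt))
--             cur, cnt = v, 1
--     if cur is not None:
--         runs.append((cur, cnt))
--     # phase 2: scan the runs with a running offset, keep the matching ones
--     intervals = []
--     offset = 0
--     for v, n in runs:
--         if v == label:
--             intervals.append([offset, offset + n - 1])
--         offset += n
--     return intervals
-- ===== Notes on version B (the rewrite author's own statement) =====
-- stated objective: alternative
-- what changed: Replaces A's single stateful start-sentinel scan by a two-phase decomposition: run-length encode the label sequence, then scan the runs with a running offset and emit [offset, offset+len-1] for runs matching the label.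
import Mathlib
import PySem

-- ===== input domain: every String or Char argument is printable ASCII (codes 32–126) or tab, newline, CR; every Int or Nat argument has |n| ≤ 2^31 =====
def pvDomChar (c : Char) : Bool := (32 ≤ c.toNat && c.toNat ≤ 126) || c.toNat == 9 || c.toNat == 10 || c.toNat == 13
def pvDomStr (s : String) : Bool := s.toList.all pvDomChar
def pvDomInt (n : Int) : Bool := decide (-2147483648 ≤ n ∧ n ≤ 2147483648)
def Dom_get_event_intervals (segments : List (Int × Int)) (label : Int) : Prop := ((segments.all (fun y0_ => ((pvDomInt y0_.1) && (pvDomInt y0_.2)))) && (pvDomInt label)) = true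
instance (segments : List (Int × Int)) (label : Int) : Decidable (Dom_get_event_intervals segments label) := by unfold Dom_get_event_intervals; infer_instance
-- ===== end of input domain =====

-- B replaces A's stateful start-sentinel scan by run-length encoding followed by an offset scan over the runs (alternative decomposition, same cost).


-- ===== PORT A =====
-- A's for-loop over enumerate(labels): state (start, intervals), idx carried explicitly
def pvLoopA (label : Int) : List Int → Int → Option Int → List (List Int) → Option Int × List (List Int)
  | [], _, start, intervals => (start, intervals)
  | v :: rest, idx, start, intervals =>
    if v = label then
      match start with
      | none => pvLoopA label rest (idx + 1) (some idx) intervals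
      | some _ => pvLoopA label rest (idx + 1) start intervals
    else
      match start with
      | some s => pvLoopA label rest (idx + 1) none (intervals ++ [[s, idx - 1]])
      | none => pvLoopA label rest (idx + 1) none intervals

def get_event_intervals (segments : List (Int × Int)) (label : Int) : List (List Int) :=
  let labels := segments.map (fun s => s.1)   -- int(s[0]) on an int is the identity
  match pvLoopA label labels 0 none [] with
  | (some s, intervals) => intervals ++ [[s, (labels.length : Int) - 1]]
  | (none, intervals) => intervals

-- ===== PORT B =====
-- phase 1 of Source B: run-length encoding; state = pending run (cur, cnt)
def pvRunsAux (v cnt : Int) : List Int → List (Int × Int)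
  | [] => [(v, cnt)]
  | x :: xs => if x = v then pvRunsAux v (cnt + 1) xs else (v, cnt) :: pvRunsAux x 1 xs

def pvRuns : List Int → List (Int × Int)
  | [] => []
  | x :: xs => pvRunsAux x 1 xs

-- phase 2 of Source B: scan runs with running offset
def pvLoopB (label : Int) : List (Int × Int) → Int → List (List Int) → List (List Int)
  | [], _, acc => acc
  | (v, n) :: rs, off, acc =>
    pvLoopB label rs (off + n) (if v = label then acc ++ [[off, off + n - 1]] else acc)

def get_event_intervals_alt (segments : List (Int × Int)) (label : Int) : List (List Int) :=
  let labels := segments.map (fun s => s.1)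
  pvLoopB label (pvRuns labels) 0 []

-- ===== PRECONDITION & SPEC =====
def Spec_get_event_intervals (segments : List (Int × Int)) (label : Int) (out : List (List Int)) : Prop := out = get_event_intervals_alt segments label
instance (segments : List (Int × Int)) (label : Int) (out : List (List Int)) : Decidable (Spec_get_event_intervals segments label out) := by unfold Spec_get_event_intervals; infer_instance

-- ===== CLAIM (what is proved, stated in full; the proofs are below) =====
def Claim_equal_get_event_intervals : Prop := ∀ (segments : List (Int × Int)) (label : Int), Dom_get_event_intervals segments label → Spec_get_event_intervals segments label (get_event_intervals segments label)

-- ===== LEMMAS AND PROOFS =====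

-- finish the A-loop state: close a pending run at endIdx - 1
def pvFinish (st : Option Int × List (List Int)) (endIdx : Int) : List (List Int) :=
  match st with
  | (some s, ivs) => ivs ++ [[s, endIdx - 1]]
  | (none, ivs) => ivs

-- key invariant: B's scan of a pending run (v, n) starting at off equals the finished A-loop
lemma pv_key (label : Int) (xs : List Int) : ∀ (v n off : Int) (acc : List (List Int)),
    pvLoopB label (pvRunsAux v n xs) off acc =
      pvFinish (pvLoopA label xs (off + n)
        (if v = label then some off else none) acc) (off + n + (xs.length : Int)) := by
  induction xs with
  | nil =>
    intro v n off acc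
    by_cases hv : v = label <;>
      simp [pvRunsAux, pvLoopB, pvLoopA, pvFinish, hv]
  | cons x rest ih =>
    intro v n off acc
    by_cases hx : x = v
    · have hstep : pvLoopA label (x :: rest) (off + n) (if v = label then some off else none) acc
          = pvLoopA label rest (off + n + 1) (if v = label then some off else none) acc := by
        by_cases hv : v = label
        · have hxl : x = label := hx.trans hv
          simp [pvLoopA, hxl, hv]
        · have hxl : ¬ x = label := fun h => hv (hx.symm.trans h)
          simp [pvLoopA, hxl, hv]
      simp only [pvRunsAux, if_pos hx]
      rw [ih v (n + 1) off acc, hstep, show off + (n + 1) = off + n + 1 from by ring]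
      congr 1
      simp only [List.length_cons]; push_cast; ring
    · have hstep : pvLoopA label (x :: rest) (off + n) (if v = label then some off else none) acc
          = pvLoopA label rest (off + n + 1) (if x = label then some (off + n) else none)
              (if v = label then acc ++ [[off, off + n - 1]] else acc) := by
        by_cases hv : v = label
        · have hxl : ¬ x = label := fun h => hx (h.trans hv.symm)
          simp [pvLoopA, hxl, hv]
        · by_cases hxl : x = label <;> simp [pvLoopA, hxl, hv]
      simp only [pvRunsAux, if_neg hx, pvLoopB]
      rw [ih x 1 (off + n) (if v = label then acc ++ [[off, off + n - 1]] else acc), hstep]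
      congr 1
      simp only [List.length_cons]; push_cast; ring

lemma pv_main (labels : List Int) (label : Int) :
    (match pvLoopA label labels 0 none [] with
      | (some s, intervals) => intervals ++ [[s, (labels.length : Int) - 1]]
      | (none, intervals) => intervals) = pvLoopB label (pvRuns labels) 0 [] := by
  cases labels with
  | nil => simp [pvLoopA, pvRuns, pvLoopB]
  | cons x ls =>
    have hstep : pvLoopA label (x :: ls) 0 none []
        = pvLoopA label ls (0 + 1) (if x = label then some 0 else none) [] := by
      by_cases hx : x = label <;> simp [pvLoopA, hx]
    show pvFinish (pvLoopA label (x :: ls) 0 none []) (((x :: ls).length : Int))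
        = pvLoopB label (pvRuns (x :: ls)) 0 []
    rw [hstep]
    simp only [pvRuns]
    rw [pv_key label ls x 1 0 []]
    congr 1
    simp only [List.length_cons]; push_cast; ring

-- ===== VERDICT (by name: the statement is the Claim_ definition above) =====
theorem get_event_intervals_spec : Claim_equal_get_event_intervals := by
  intro segments label _
  unfold Spec_get_event_intervals get_event_intervals get_event_intervals_alt
  exact pv_main (segments.map (fun s => s.1)) label
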